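-- pv_equiv track=rewrite | github.com/sevenfeng012/Machine-Learning | textcnn/doc2sentence/doc2SentenceProcess.py | distributeWordFrequency
-- ===== SOURCE A (Python) =====
-- def distributeWordFrequency(data_list):
--     all_words_dict = {}
--
--     for word_list in data_list:
--         for word in word_list:
--             if word in all_words_dict.keys():
--                 all_words_dict[word] += 1
--             else:
--                 all_words_dict[word] = 1
--
--     all_words_tuple_list = sorted(
--         all_words_dict.items(), key=lambda f: f[1], reverse=True)
--
--     all_words_list, all_words_nums = zip(*all_words_tuple_list)
--
--     all_words_list = list(all_words_list)
--
--     return all_words_list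
-- ===== SOURCE B (Python) =====
-- def distributeWordFrequency(data_list):
--     counts = {}
--     for word_list in data_list:
--         for word in word_list:
--             counts[word] = counts.get(word, 0) + 1
--     max_count = max(counts.values()) if counts else 0
--     buckets = {}
--     for word, c in counts.items():
--         buckets.setdefault(c, []).append(word)
--     result = []
--     for c in range(max_count, 0, -1):
--         result += buckets.get(c, [])
--     return result
-- ===== Notes on version B (the rewrite author's own statement) =====
-- stated objective: alternative
-- what changed: Replaces the comparison sort (sorted by count, reverse) plus zip(*) unpacking with a counting sort: group words into per-frequency buckets (dict insertion order) and emit the buckets from max_count down to 1.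
-- crash fix: On input containing no words at all (every inner list empty) A raises ValueError at the zip(*) unpacking, while B returns an empty list. — e.g. on distributeWordFrequency([[]]): A raises ValueError, B returns []
import Mathlib
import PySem

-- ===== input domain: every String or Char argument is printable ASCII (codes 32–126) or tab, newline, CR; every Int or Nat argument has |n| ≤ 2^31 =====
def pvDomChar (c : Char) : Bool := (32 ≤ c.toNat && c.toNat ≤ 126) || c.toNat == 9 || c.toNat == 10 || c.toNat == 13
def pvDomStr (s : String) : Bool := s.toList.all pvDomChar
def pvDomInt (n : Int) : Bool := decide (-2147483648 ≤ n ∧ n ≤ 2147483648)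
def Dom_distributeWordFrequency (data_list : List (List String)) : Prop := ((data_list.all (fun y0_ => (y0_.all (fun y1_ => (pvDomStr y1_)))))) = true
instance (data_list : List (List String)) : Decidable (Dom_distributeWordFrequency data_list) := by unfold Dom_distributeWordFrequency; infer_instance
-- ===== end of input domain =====

-- B replaces A's comparison sort + zip(*) unpacking with a counting sort: per-frequency buckets,
-- emitted from max_count down to 1 (return-value equivalence on Pre_; neither mutates its input).

-- ===== PORT A =====
def distributeWordFrequency (data_list : List (List String)) : List String :=
  let all_words_dict : PySem.Dict String Int :=
    data_list.foldl (fun d word_list =>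
      word_list.foldl (fun d word =>
        if d.contains word then d.modify word 0 (fun v => v + 1)
        else d.insert word 1) d) PySem.Dict.empty
  let all_words_tuple_list :=
    PySem.List.sorted all_words_dict.items (fun f => f.2) true
  -- zip(*all_words_tuple_list) raises ValueError when the list is empty: excluded by Pre_;
  -- on Pre_ it yields exactly the first components, i.e. the map below.
  all_words_tuple_list.map (fun p => p.1)

-- ===== PORT B =====
def distributeWordFrequency_alt (data_list : List (List String)) : List String :=
  let counts : PySem.Dict String Int :=
    data_list.foldl (fun d word_list =>
      word_list.foldl (fun d word => d.insert word (d.getD word 0 + 1)) d) PySem.Dict.empty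
  let max_count : Int :=
    match PySem.List.max? counts.values (fun v => v) with
    | some m => m
    | none => 0
  -- buckets.setdefault(c, []).append(word): fetch-or-create the bucket, then extend it in place;
  -- ported as setdefault followed by modify (d[k] = d.get(k, []) ++ [word] on the fetched dict).
  let buckets : PySem.Dict Int (List String) :=
    counts.items.foldl (fun b p =>
      (b.setdefault p.2 []).modify p.2 [] (fun l => l ++ [p.1])) PySem.Dict.empty
  (PySem.List.pyRange max_count 0 (-1)).foldl (fun result c => result ++ buckets.getD c []) []

-- ===== PRECONDITION & SPEC =====
-- Pre_ excludes only the inputs containing no word at all: there A's zip(*) raises ValueError.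
def Pre_distributeWordFrequency (data_list : List (List String)) : Prop :=
  data_list.flatten ≠ []
instance (data_list : List (List String)) : Decidable (Pre_distributeWordFrequency data_list) := by
  unfold Pre_distributeWordFrequency; infer_instance
def pvWitness_distributeWordFrequency : List (List String) := [["a", "b"], ["a"]]

-- On inputs with no words at all A raises ValueError (zip of an empty sequence); B returns [].
def Raises_distributeWordFrequency (data_list : List (List String)) : Prop :=
  data_list.flatten = []
instance (data_list : List (List String)) : Decidable (Raises_distributeWordFrequency data_list) := by
  unfold Raises_distributeWordFrequency; infer_instance
def pvRaiseWitness_distributeWordFrequency : List (List String) := [[]]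
def pvRaiseWitnessOut_distributeWordFrequency : List String := []

def Spec_distributeWordFrequency (data_list : List (List String)) (out : List String) : Prop :=
  out = distributeWordFrequency_alt data_list
instance (data_list : List (List String)) (out : List String) : Decidable (Spec_distributeWordFrequency data_list out) := by
  unfold Spec_distributeWordFrequency; infer_instance

-- ===== CLAIM (what is proved, stated in full; the proofs are below) =====
def Claim_equal_distributeWordFrequency : Prop := ∀ (data_list : List (List String)), Dom_distributeWordFrequency data_list → Pre_distributeWordFrequency data_list → Spec_distributeWordFrequency data_list (distributeWordFrequency data_list)
def Claim_raises_distributeWordFrequency : Prop := (∀ (data_list : List (List String)), Dom_distributeWordFrequency data_list → Raises_distributeWordFrequency data_list → ¬ Pre_distributeWordFrequency data_list) ∧ (Dom_distributeWordFrequency (pvRaiseWitness_distributeWordFrequency) ∧ Raises_distributeWordFrequency (pvRaiseWitness_distributeWordFrequency) ∧ distributeWordFrequency_alt (pvRaiseWitness_distributeWordFrequency) = pvRaiseWitnessOut_distributeWordFrequency)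

-- ===== LEMMAS AND PROOFS =====

-- One counting step of A equals one counting step of B (both are d[w] = d.get(w,0)+1).
lemma countStep_eq (d : PySem.Dict String Int) (w : String) :
    (if d.contains w then d.modify w 0 (fun v => v + 1) else d.insert w 1) =
      d.insert w (d.getD w 0 + 1) := by
  by_cases h : d.contains w
  · simp [h, PySem.Dict.modify]
  · rw [if_neg h, PySem.Dict.getD_of_not_contains (d := d) (k := w) (d0 := (0:Int)) (by simpa using h)]; norm_num

-- Both counting loops build Counter(flatten data_list).
lemma dictA_eq (data_list : List (List String)) :
    data_list.foldl (fun d word_list =>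
      word_list.foldl (fun d word =>
        if d.contains word then d.modify word 0 (fun v => v + 1)
        else d.insert word 1) d) PySem.Dict.empty =
      PySem.Dict.counter data_list.flatten := by
  simp only [countStep_eq]
  rw [← List.foldl_flatten, PySem.Dict.foldl_insert_getD_add_one_eq_counter]

lemma dictB_eq (data_list : List (List String)) :
    data_list.foldl (fun d word_list =>
      word_list.foldl (fun d word => d.insert word (d.getD word 0 + 1)) d) PySem.Dict.empty =
      PySem.Dict.counter data_list.flatten := by
  rw [← List.foldl_flatten, PySem.Dict.foldl_insert_getD_add_one_eq_counter]

-- One bucket step of B: setdefault-then-append equals d[c] = d.get(c, []) + [word].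
lemma bucketStep_eq (b : PySem.Dict Int (List String)) (p : String × Int) :
    (b.setdefault p.2 []).modify p.2 [] (fun l => l ++ [p.1]) =
      b.modify p.2 [] (fun l => l ++ [p.1]) := by
  by_cases h : b.contains p.2
  · rw [PySem.Dict.setdefault_of_contains b ([] : List String) h]
  · rw [PySem.Dict.setdefault_of_not_contains b ([] : List String) (by simpa using h)]
    have hg := PySem.Dict.getD_of_not_contains (d := b) (k := p.2) (d0 := ([] : List String))
      (by simpa using h)
    simp [PySem.Dict.modify, PySem.Dict.insert_insert_self, PySem.Dict.getD_insert_self, hg]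

-- B's bucket dict holds, at each count c, the words of frequency c in insertion order.
lemma bucketsGetD (items : List (String × Int)) (c : Int) :
    (items.foldl (fun b p =>
      (b.setdefault p.2 []).modify p.2 [] (fun l => l ++ [p.1])) PySem.Dict.empty).getD c [] =
      (items.filter (fun p => p.2 == c)).map (fun p => p.1) := by
  simp only [bucketStep_eq]
  have hswap : items.foldl (fun b p => b.modify p.2 [] (fun l => l ++ [p.1])) PySem.Dict.empty
      = (items.map Prod.swap).foldl (fun b q => b.modify q.1 [] (fun l => l ++ [q.2]))
          PySem.Dict.empty := by
    rw [List.foldl_map]; rfl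
  rw [hswap, PySem.Dict.getD_foldl_modify_append]
  simp [List.filter_map, Function.comp_def]

lemma insertBy_append_left {α : Type} (before : α → α → Bool) (x : α) (A B : List α)
    (h : ∀ y ∈ A, before x y = false) :
    PySem.List.insertBy before x (A ++ B) = A ++ PySem.List.insertBy before x B := by
  induction A with
  | nil => simp
  | cons a A ih =>
      simp only [List.cons_append, PySem.List.insertBy, h a (by simp)]
      simp only [Bool.false_eq_true, if_false, List.cons.injEq, true_and]
      exact ih (fun y hy => h y (by simp [hy]))

lemma insertBy_all_before {α : Type} (before : α → α → Bool) (x : α) (B : List α)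
    (h : ∀ y ∈ B, before x y = true) :
    PySem.List.insertBy before x B = x :: B := by
  cases B with
  | nil => rfl
  | cons b B => simp [PySem.List.insertBy, h b (by simp)]

-- Stable reverse sort by the second component is the bucket sweep over any strictly
-- decreasing list of counts covering all second components.
lemma sorted_rev_snd_eq_flatMap {α : Type} (cs : List Int) (l : List (α × Int))
    (hcs : cs.Pairwise (· > ·)) (hl : ∀ p ∈ l, p.2 ∈ cs) :
    PySem.List.sorted l (fun p => p.2) true =
      cs.flatMap (fun c => l.filter (fun p => p.2 == c)) := by
  rw [PySem.List.sorted_rev_eq_foldl_insertBy]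
  induction l using List.reverseRecOn with
  | nil => simp
  | append_singleton l x ih =>
      rw [List.foldl_append, List.foldl_cons, List.foldl_nil,
        ih (fun p hp => hl p (by simp [hp]))]
      obtain ⟨cs₁, cs₂, rfl⟩ := List.append_of_mem (hl x (by simp))
      have hpa := (List.pairwise_append.mp hcs)
      have h1 : ∀ c ∈ cs₁, x.2 < c := fun c hc => hpa.2.2 c hc x.2 (by simp)
      have h2 : ∀ c ∈ cs₂, c < x.2 := fun c hc => (List.pairwise_cons.mp hpa.2.1).1 c hc
      have hfilter : ∀ c, (l ++ [x]).filter (fun p => p.2 == c) =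
          l.filter (fun p => p.2 == c) ++ if x.2 = c then [x] else [] := by
        intro c
        rw [List.filter_append]
        congr 1
        by_cases h : x.2 = c <;> simp [h]
      have hne1 : ∀ c ∈ cs₁, ¬ (x.2 = c) := fun c hc h => absurd (h1 c hc) (by omega)
      have hne2 : ∀ c ∈ cs₂, ¬ (x.2 = c) := fun c hc h => absurd (h2 c hc) (by omega)
      rw [List.flatMap_append, List.flatMap_cons, List.flatMap_append, List.flatMap_cons]
      conv_rhs => rw [List.flatMap_congr (g := fun c => List.filter (fun p => p.2 == c) l) (l := cs₁)
            (fun c hc => by rw [hfilter c, if_neg (hne1 c hc), List.append_nil]),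
          List.flatMap_congr (g := fun c => List.filter (fun p => p.2 == c) l) (l := cs₂)
            (fun c hc => by rw [hfilter c, if_neg (hne2 c hc), List.append_nil]),
          hfilter x.2, if_pos rfl]
      rw [← List.append_assoc, insertBy_append_left]
      · rw [insertBy_all_before]
        · simp
        · intro y hy
          obtain ⟨c, hc, hyc⟩ := List.mem_flatMap.mp hy
          have := (List.mem_filter.mp hyc).2
          simp only [beq_iff_eq] at this
          simp [this]
          exact h2 c hc
      · intro y hy
        rcases List.mem_append.mp hy with hy | hy
        · obtain ⟨c, hc, hyc⟩ := List.mem_flatMap.mp hy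
          have := (List.mem_filter.mp hyc).2
          simp only [beq_iff_eq] at this
          simp only [decide_eq_false_iff_not, not_lt, this]
          exact le_of_lt (h1 c hc)
        · have := (List.mem_filter.mp hy).2
          simp only [beq_iff_eq] at this
          simp [this]

-- ===== VERDICT (by name: the statement is the Claim_ definition above) =====
theorem distributeWordFrequency_spec : Claim_equal_distributeWordFrequency := by
  intro data_list _ hpre
  unfold Spec_distributeWordFrequency distributeWordFrequency distributeWordFrequency_alt
  rw [dictA_eq, dictB_eq]
  set ws := data_list.flatten with hws
  set d := PySem.Dict.counter ws with hd
  have hitems : d.items = (PySem.Set.ofList ws).map (fun k => (k, (ws.count k : Int))) :=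
    PySem.Dict.items_counter ws
  have hvne : d.values ≠ [] := by
    have hine : d.items ≠ [] := by
      rw [hitems]
      simp only [ne_eq, List.map_eq_nil_iff]
      intro h
      rcases List.exists_mem_of_ne_nil ws hpre with ⟨w, hw⟩
      exact absurd h (by intro hh; exact absurd ((PySem.Set.mem_ofList ws w).mpr hw) (by simp [hh]))
    simpa [PySem.Dict.values, List.map_eq_nil_iff] using hine
  obtain ⟨m, hm⟩ : ∃ m, PySem.List.max? d.values (fun v => v) = some m := by
    cases h : PySem.List.max? d.values (fun v => v) with
    | none => exact absurd ((PySem.List.max?_eq_none_iff _ _).mp h) hvne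
    | some m => exact ⟨m, rfl⟩
  simp only [hm]
  have hmem : ∀ p ∈ d.items, p.2 ∈ PySem.List.pyRange m 0 (-1) := by
    intro p hp
    rw [PySem.List.mem_pyRange_neg_one]
    constructor
    · rw [hitems] at hp
      obtain ⟨k, hk, rfl⟩ := List.mem_map.mp hp
      have hkw : k ∈ ws := (PySem.Set.mem_ofList ws k).mp hk
      show (0:ℤ) < (List.count k ws : Int)
      exact_mod_cast List.count_pos_iff.mpr hkw
    · have hpv : p.2 ∈ d.values := by
        simp only [PySem.Dict.values]
        exact List.mem_map.mpr ⟨p, hp, rfl⟩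
      exact PySem.List.max?_isMax hm p.2 hpv
  have hpw : (PySem.List.pyRange m 0 (-1)).Pairwise (· > ·) := by
    rw [PySem.List.pyRange_neg_one_eq_reverse, List.pairwise_reverse]
    exact PySem.List.pairwise_lt_pyRange_one 1 (m + 1)
  rw [sorted_rev_snd_eq_flatMap _ _ hpw hmem, List.map_flatMap,
    PySem.List.foldl_append_eq_flatMap, List.nil_append]
  simp only [bucketsGetD]

def distributeWordFrequency_raises : Claim_raises_distributeWordFrequency := by
  unfold Claim_raises_distributeWordFrequency
  exact ⟨fun dl _ h hp => hp h, by decide⟩
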